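-- pv_equiv track=rewrite | github.com/WadeYin9712/UI-Simulator | web_collector.py | divide_state
-- ===== SOURCE A (Python) =====
-- def divide_state(a11y_tree):
--     result = []
--     buffer = []
--     indent_stack = []
--     lines = a11y_tree.splitlines()
--     base_indent = len(lines[1])-len(lines[1].lstrip())
--
--     for line in lines:
--         # calculate indent for each line
--         cur_indent = len(line)-len(line.lstrip())
--         # Flush the buffer if we encounter a new top-level element
--         while indent_stack and cur_indent <= base_indent:
--             indent_stack.pop()
--             if buffer:
--                 result.append("\n".join(buffer))
--                 buffer = []
--
--         # Add the current line to the buffer otherwise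
--         buffer.append(line)
--         indent_stack.append(cur_indent)
--
--     # append the last buffer
--     if buffer:
--         result.append("\n".join(buffer))
--     result = [ele.strip() for ele in result]
--
--     return result
-- ===== SOURCE B (Python) =====
-- def divide_state(a11y_tree):
--     lines = a11y_tree.splitlines()
--     base_indent = len(lines[1]) - len(lines[1].lstrip())
--     # pass 1: indices of top-level lines are block boundaries
--     boundaries = [0]
--     for i in range(1, len(lines)):
--         if len(lines[i]) - len(lines[i].lstrip()) <= base_indent:
--             boundaries.append(i)
--     boundaries.append(len(lines))
--     # pass 2: slice out each block, join and strip it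
--     return ["\n".join(lines[s:e]).strip() for s, e in zip(boundaries, boundaries[1:])]
-- ===== Notes on version B (the rewrite author's own statement) =====
-- stated objective: alternative
-- what changed: Replaced A's running buffer/indent-stack flush machine with a two-pass index decomposition: first collect the boundary indices of top-level lines, then slice, join and strip each block between consecutive boundaries.
import Mathlib
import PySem

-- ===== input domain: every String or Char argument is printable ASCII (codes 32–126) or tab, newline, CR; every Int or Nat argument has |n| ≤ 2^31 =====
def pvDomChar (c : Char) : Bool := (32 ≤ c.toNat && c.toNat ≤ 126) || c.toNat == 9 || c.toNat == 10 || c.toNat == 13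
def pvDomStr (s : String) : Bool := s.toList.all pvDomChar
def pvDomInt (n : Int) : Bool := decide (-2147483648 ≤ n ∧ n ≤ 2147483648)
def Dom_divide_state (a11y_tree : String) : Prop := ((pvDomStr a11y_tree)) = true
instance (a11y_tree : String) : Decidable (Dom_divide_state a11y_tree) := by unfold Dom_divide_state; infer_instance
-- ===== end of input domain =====

-- B replaces A's buffer/indent-stack flush machine with a boundary-index pass followed by a slice-join-strip pass; equal output, same cost.

-- ===== PORT A =====
-- shared helper: len(line) - len(line.lstrip())
def pyind (l : String) : Int := (PySem.Str.len l : Int) - (PySem.Str.len (PySem.Str.lstrip l) : Int)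

-- the inner `while indent_stack and cur_indent <= base_indent:` loop (pop = dropLast)
def whileFlush (base cur : Int) (stk : List Int) (res buf : List String) :
    List String × List String × List Int :=
  if h : stk ≠ [] ∧ cur ≤ base then
    if buf ≠ [] then
      whileFlush base cur stk.dropLast (res ++ [PySem.Str.join "\n" buf]) []
    else
      whileFlush base cur stk.dropLast res buf
  else (res, buf, stk)
termination_by stk.length
decreasing_by
  all_goals
    simp only [List.length_dropLast]
    exact Nat.sub_lt (List.length_pos_of_ne_nil h.1) Nat.one_pos

-- the body of A's `for line in lines:` loop
def stepA (base : Int) (st : List String × List String × List Int) (line : String) :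
    List String × List String × List Int :=
  let cur := pyind line
  let w := whileFlush base cur st.2.2 st.1 st.2.1
  (w.1, w.2.1 ++ [line], w.2.2 ++ [cur])

def divide_state (a11y_tree : String) : List String :=
  let lines := PySem.Str.splitlines a11y_tree
  match PySem.List.pyGet? lines 1 with
  | none => []   -- Python raises IndexError here; excluded by Pre_divide_state
  | some l1 =>
    let base := pyind l1
    let st := lines.foldl (stepA base) ([], [], [])
    let res := if st.2.1 ≠ [] then st.1 ++ [PySem.Str.join "\n" st.2.1] else st.1
    res.map PySem.Str.strip

-- ===== PORT B =====
def divide_state_alt (a11y_tree : String) : List String :=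
  let lines := PySem.Str.splitlines a11y_tree
  match PySem.List.pyGet? lines 1 with
  | none => []   -- same IndexError; excluded by Pre_divide_state
  | some l1 =>
    let base := pyind l1
    let bnd := (PySem.List.pyRange 1 (lines.length : Int) 1).foldl
      (fun bs i => if pyind (PySem.List.pyGetD lines i "") ≤ base then bs ++ [i] else bs)
      [(0 : Int)]
    let bndFull := bnd ++ [(lines.length : Int)]
    (bndFull.zip bndFull.tail).map
      (fun p => PySem.Str.strip (PySem.Str.join "\n" (PySem.List.slice lines (some p.1) (some p.2))))

-- ===== PRECONDITION & SPEC =====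
-- Pre_ excludes exactly the inputs on which A raises IndexError at lines[1] (fewer than 2 lines); B raises there too.
def Pre_divide_state (a11y_tree : String) : Prop :=
  2 ≤ (PySem.Str.splitlines a11y_tree).length
instance (a11y_tree : String) : Decidable (Pre_divide_state a11y_tree) := by
  unfold Pre_divide_state; infer_instance

def pvWitness_divide_state : String := "RootWebArea\n  button 'a'\n    text\n  link 'b'"

def Spec_divide_state (a11y_tree : String) (out : List String) : Prop := out = divide_state_alt a11y_tree
instance (a11y_tree : String) (out : List String) : Decidable (Spec_divide_state a11y_tree out) := by unfold Spec_divide_state; infer_instance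

-- ===== CLAIM (what is proved, stated in full; the proofs are below) =====
def Claim_equal_divide_state : Prop := ∀ (a11y_tree : String), Dom_divide_state a11y_tree → Pre_divide_state a11y_tree → Spec_divide_state a11y_tree (divide_state a11y_tree)

-- ===== LEMMAS AND PROOFS =====

-- the common grouping both programs compute: split the remaining lines into blocks at top-level lines
def goB (base : Int) : List String → List String → List (List String)
  | [], buf => [buf]
  | x :: xs, buf => if pyind x ≤ base then buf :: goB base xs [x] else goB base xs (buf ++ [x])

theorem wf_emptybuf (base cur : Int) (hc : cur ≤ base) :
    ∀ (stk : List Int) (res : List String),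
      whileFlush base cur stk res [] = (res, [], []) := by
  intro stk
  induction stk using List.reverseRecOn with
  | nil => intro res; rw [whileFlush]; simp
  | append_singleton xs x ih =>
      intro res
      rw [whileFlush]
      simp [hc, ih res]

theorem wf_pos (base cur : Int) (stk : List Int) (res buf : List String)
    (hs : stk ≠ []) (hb : buf ≠ []) (hc : cur ≤ base) :
    whileFlush base cur stk res buf = (res ++ [PySem.Str.join "\n" buf], [], []) := by
  rw [whileFlush]
  simp [hs, hb, hc, wf_emptybuf base cur hc]

theorem wf_neg (base cur : Int) (stk : List Int) (res buf : List String)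
    (hc : ¬ cur ≤ base) :
    whileFlush base cur stk res buf = (res, buf, stk) := by
  rw [whileFlush]
  simp [hc]

theorem A_fold (base : Int) :
    ∀ (ls : List String) (res buf : List String) (stk : List Int),
      buf ≠ [] → stk ≠ [] →
      (ls.foldl (stepA base) (res, buf, stk)).2.1 ≠ [] ∧
      (ls.foldl (stepA base) (res, buf, stk)).1 ++
          [PySem.Str.join "\n" (ls.foldl (stepA base) (res, buf, stk)).2.1]
        = res ++ (goB base ls buf).map (PySem.Str.join "\n") := by
  intro ls
  induction ls with
  | nil => intro res buf stk hb hs; simpa [goB] using hb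
  | cons x xs ih =>
      intro res buf stk hb hs
      by_cases hc : pyind x ≤ base
      · have hstep : stepA base (res, buf, stk) x
            = (res ++ [PySem.Str.join "\n" buf], [x], [pyind x]) := by
          simp [stepA, wf_pos base (pyind x) stk res buf hs hb hc]
        have := ih (res ++ [PySem.Str.join "\n" buf]) [x] [pyind x] (by simp) (by simp)
        simp only [List.foldl_cons, hstep]
        refine ⟨this.1, ?_⟩
        rw [this.2]
        simp [goB, hc]
      · have hstep : stepA base (res, buf, stk) x
            = (res, buf ++ [x], stk ++ [pyind x]) := by
          simp [stepA, wf_neg base (pyind x) stk res buf hc]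
        have := ih res (buf ++ [x]) (stk ++ [pyind x]) (by simp) (by simp)
        simp only [List.foldl_cons, hstep]
        refine ⟨this.1, ?_⟩
        rw [this.2]
        simp [goB, hc]

-- B-side: consecutive boundary pairs slice `lines` into exactly the goB groups
theorem B_slices (lines : List String) (base : Int) :
    ∀ (k j s : Nat), j + k = lines.length → s < j →
      (let bs := ((s : Int) ::
          ((PySem.List.pyRange (j : Int) (lines.length : Int) 1).filter
            (fun i => decide (pyind (PySem.List.pyGetD lines i "") ≤ base))) ++
          [(lines.length : Int)])
       (bs.zip bs.tail).map (fun p => PySem.List.slice lines (some p.1) (some p.2)))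
        = goB base (lines.drop j) ((lines.take j).drop s) := by
  intro k
  induction k with
  | zero =>
      intro j s hj hs
      have hjn : j = lines.length := by omega
      subst hjn
      simp [PySem.List.pyRange_one_eq_nil (le_refl ((lines.length : Int))), goB,
        PySem.List.slice_natCast]
  | succ k ih =>
      intro j s hj hs
      have hjlt : j < lines.length := by omega
      have hjn : (j : Int) < (lines.length : Int) := by exact_mod_cast hjlt
      rw [PySem.List.pyRange_one_cons hjn]
      have hget : PySem.List.pyGetD lines (j : Int) "" = lines[j] := by
        simp [PySem.List.pyGetD_natCast, List.getD_eq_getElem?_getD,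
          List.getElem?_eq_getElem hjlt]
      have hdropj : lines.drop j = lines[j] :: lines.drop (j+1) :=
        List.drop_eq_getElem_cons hjlt
      have htakej : lines.take (j+1) = lines.take j ++ [lines[j]] := by
        rw [List.take_add_one, List.getElem?_eq_getElem hjlt]; rfl
      have hlentj : (lines.take j).length = j := by simp [List.length_take]; omega
      by_cases hp : pyind lines[j] ≤ base
      · simp only [List.filter_cons, hget, hp, decide_true, if_true]
        have ihj := ih (j+1) j (by omega) (by omega)
        simp only [Nat.cast_add, Nat.cast_one, List.cons_append, List.tail_cons] at ihj
        simp only [List.cons_append, List.zip_cons_cons, List.tail_cons, List.map_cons]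
        rw [ihj, hdropj]
        simp only [goB, hp, if_true]
        congr 1
        · rw [PySem.List.slice_natCast, ← List.drop_take]
        · congr 1
          rw [htakej, List.drop_left' hlentj]
      · simp only [List.filter_cons, hget, hp, decide_false, Bool.false_eq_true, if_false]
        have ihj := ih (j+1) s (by omega) (by omega)
        simp only [Nat.cast_add, Nat.cast_one] at ihj
        rw [ihj, hdropj]
        simp only [goB, hp, if_false]
        congr 1
        rw [htakej, List.drop_append_of_le_length (by omega)]

theorem wf_nil (base cur : Int) (res buf : List String) :
    whileFlush base cur [] res buf = (res, buf, []) := by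
  rw [whileFlush]; simp

-- ===== VERDICT (by name: the statement is the Claim_ definition above) =====
theorem divide_state_spec : Claim_equal_divide_state := by
  intro t _ hpre
  unfold Spec_divide_state
  unfold Pre_divide_state at hpre
  obtain ⟨a, b, rest, hlines⟩ : ∃ a b rest, PySem.Str.splitlines t = a :: b :: rest := by
    rcases hsp : PySem.Str.splitlines t with _ | ⟨a, _ | ⟨b, rest⟩⟩
    · rw [hsp] at hpre; simp at hpre
    · rw [hsp] at hpre; simp at hpre
    · exact ⟨a, b, rest, rfl⟩
  have hget1 : PySem.List.pyGet? (PySem.Str.splitlines t) 1 = some b := by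
    rw [hlines, show (1 : Int) = ((1 : Nat) : Int) from rfl, PySem.List.pyGet?_natCast]
    rfl
  -- A side
  have hstep0 : stepA (pyind b) ([], [], []) a = ([], [a], [pyind a]) := by
    simp [stepA, wf_nil]
  have hA := A_fold (pyind b) (b :: rest) [] [a] [pyind a] (by simp) (by simp)
  have hAval : divide_state t
      = ((goB (pyind b) (b :: rest) [a]).map (PySem.Str.join "\n")).map PySem.Str.strip := by
    simp only [divide_state, hget1]
    rw [hlines, List.foldl_cons, hstep0, if_pos hA.1, hA.2]
    simp
  -- B side
  have hbnd : ((PySem.List.pyRange 1 ((PySem.Str.splitlines t).length : Int) 1).foldl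
      (fun bs i => if pyind (PySem.List.pyGetD (PySem.Str.splitlines t) i "") ≤ pyind b
        then bs ++ [i] else bs) [(0 : Int)])
      = [(0 : Int)] ++ (PySem.List.pyRange 1 ((PySem.Str.splitlines t).length : Int) 1).filter
          (fun i => decide (pyind (PySem.List.pyGetD (PySem.Str.splitlines t) i "") ≤ pyind b)) :=
    PySem.List.foldl_append_ite_eq_filter _ _ _
  have hk : 1 + ((PySem.Str.splitlines t).length - 1) = (PySem.Str.splitlines t).length := by
    rw [hlines]; simp; omega
  have hBs := B_slices (PySem.Str.splitlines t) (pyind b)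
    ((PySem.Str.splitlines t).length - 1) 1 0 hk (by omega)
  have hdrop1 : (PySem.Str.splitlines t).drop 1 = b :: rest := by rw [hlines]; rfl
  have htake1 : ((PySem.Str.splitlines t).take 1).drop 0 = [a] := by rw [hlines]; rfl
  rw [hdrop1, htake1] at hBs
  have hBval : divide_state_alt t
      = ((goB (pyind b) (b :: rest) [a]).map (PySem.Str.join "\n")).map PySem.Str.strip := by
    simp only [divide_state_alt, hget1]
    rw [hbnd]
    have : ([(0 : Int)] ++ (PySem.List.pyRange 1 ((PySem.Str.splitlines t).length : Int) 1).filter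
          (fun i => decide (pyind (PySem.List.pyGetD (PySem.Str.splitlines t) i "") ≤ pyind b)))
        ++ [((PySem.Str.splitlines t).length : Int)]
        = (0 : Int) :: ((PySem.List.pyRange 1 ((PySem.Str.splitlines t).length : Int) 1).filter
          (fun i => decide (pyind (PySem.List.pyGetD (PySem.Str.splitlines t) i "") ≤ pyind b))
          ++ [((PySem.Str.splitlines t).length : Int)]) := by simp
    rw [this]
    rw [← hBs]
    simp [List.map_map, Function.comp]
  rw [hAval, hBval]
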